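-- pv_equiv track=rewrite | github.com/Mathias-rnd/club-world-cup-app | app.py | team_names_match
-- ===== SOURCE A (Python) =====
-- def team_names_match(team1, team2):
--     """Check if two team names match, handling common variations and typos."""
--     t1 = team1.lower().strip()
--     t2 = team2.lower().strip()
--
--     # Exact match
--     if t1 == t2:
--         return True
--
--     # Common variations
--     variations = {
--         'palmeiras': ['palmeira'],
--         'chelsea fc': ['chelsea'],
--         'manchester city': ['man city'],
--         'real madrid': ['madrid'],
--         'bayern münchen': ['bayern munchen', 'bayern'],
--         'paris saint-germain': ['psg', 'paris sg'],
--         'inter': ['inter milan'],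
--         'juventus': ['juve'],
--         'borussia dortmund': ['dortmund'],
--         'sl benfica': ['benfica'],
--         'flamengo rj': ['flamengo'],
--         'fluminense rj': ['fluminense'],
--         'botafogo - rj': ['botafogo rj', 'botafogo'],
--         'cf monterrey': ['monterrey'],
--         'al hilal': ['hilal'],
--         'boca juniors': ['boca'],
--         'inter miami cf': ['inter miami'],
--         'los angeles fc': ['la fc', 'la galaxy'],
--         'river plate': ['river'],
--         'salzburg': ['rb salzburg', 'red bull salzburg'],
--         'atletico madrid': ['atletico', 'atletico de madrid']
--     }
--
--     # Check if either team is in the variations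
--     for main_name, variants in variations.items():
--         if t1 == main_name and t2 in variants:
--             return True
--         if t2 == main_name and t1 in variants:
--             return True
--         if t1 in variants and t2 in variants:
--             return True
--
--     return False
-- ===== SOURCE B (Python) =====
-- # Flat variant->canonical table; canon(x) = lookup with identity default, then one equality test.
-- _VARIANT_TO_MAIN = {
--     'palmeira': 'palmeiras',
--     'chelsea': 'chelsea fc',
--     'man city': 'manchester city',
--     'madrid': 'real madrid',
--     'bayern munchen': 'bayern münchen',
--     'bayern': 'bayern münchen',
--     'psg': 'paris saint-germain',
--     'paris sg': 'paris saint-germain',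
--     'inter milan': 'inter',
--     'juve': 'juventus',
--     'dortmund': 'borussia dortmund',
--     'benfica': 'sl benfica',
--     'flamengo': 'flamengo rj',
--     'fluminense': 'fluminense rj',
--     'botafogo rj': 'botafogo - rj',
--     'botafogo': 'botafogo - rj',
--     'monterrey': 'cf monterrey',
--     'hilal': 'al hilal',
--     'boca': 'boca juniors',
--     'inter miami': 'inter miami cf',
--     'la fc': 'los angeles fc',
--     'la galaxy': 'los angeles fc',
--     'river': 'river plate',
--     'rb salzburg': 'salzburg',
--     'red bull salzburg': 'salzburg',
--     'atletico': 'atletico madrid',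
--     'atletico de madrid': 'atletico madrid',
-- }
--
-- def team_names_match(team1, team2):
--     """Check if two team names match, handling common variations and typos."""
--     c1 = team1.lower().strip()
--     c2 = team2.lower().strip()
--     return _VARIANT_TO_MAIN.get(c1, c1) == _VARIANT_TO_MAIN.get(c2, c2)
-- ===== Notes on version B (the rewrite author's own statement) =====
-- stated objective: simpler
-- what changed: Replaced the per-group loop with three membership tests by a flat variant-to-canonical dict built once: each name is canonicalised by one lookup (identity default) and the result is a single equality test.
import Mathlib
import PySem

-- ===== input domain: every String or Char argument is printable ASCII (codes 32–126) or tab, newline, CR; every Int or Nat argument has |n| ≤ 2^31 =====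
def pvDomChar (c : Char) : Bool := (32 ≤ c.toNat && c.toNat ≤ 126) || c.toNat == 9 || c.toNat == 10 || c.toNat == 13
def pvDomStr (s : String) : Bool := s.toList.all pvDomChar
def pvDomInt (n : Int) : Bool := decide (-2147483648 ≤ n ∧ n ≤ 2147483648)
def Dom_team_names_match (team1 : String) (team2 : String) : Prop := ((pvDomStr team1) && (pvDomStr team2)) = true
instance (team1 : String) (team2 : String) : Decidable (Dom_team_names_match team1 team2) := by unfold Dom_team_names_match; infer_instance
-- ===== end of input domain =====

-- B replaces A's per-group scan (three membership tests per group) by a flat variant→canonical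
-- dict and a single equality of canonical names; proved to return the same Bool on all inputs.

-- ===== PORT A =====
-- the `variations` dict of A, as an association list in insertion order
def tnmVariations : List (String × List String) :=
  [("palmeiras", ["palmeira"]),
   ("chelsea fc", ["chelsea"]),
   ("manchester city", ["man city"]),
   ("real madrid", ["madrid"]),
   ("bayern münchen", ["bayern munchen", "bayern"]),
   ("paris saint-germain", ["psg", "paris sg"]),
   ("inter", ["inter milan"]),
   ("juventus", ["juve"]),
   ("borussia dortmund", ["dortmund"]),
   ("sl benfica", ["benfica"]),
   ("flamengo rj", ["flamengo"]),
   ("fluminense rj", ["fluminense"]),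
   ("botafogo - rj", ["botafogo rj", "botafogo"]),
   ("cf monterrey", ["monterrey"]),
   ("al hilal", ["hilal"]),
   ("boca juniors", ["boca"]),
   ("inter miami cf", ["inter miami"]),
   ("los angeles fc", ["la fc", "la galaxy"]),
   ("river plate", ["river"]),
   ("salzburg", ["rb salzburg", "red bull salzburg"]),
   ("atletico madrid", ["atletico", "atletico de madrid"])]

-- the `for main_name, variants in variations.items():` loop with its early returns
def tnmScan (t1 t2 : String) : List (String × List String) → Bool
  | [] => false
  | (mainName, variants) :: rest =>
    if t1 == mainName && variants.contains t2 then true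
    else if t2 == mainName && variants.contains t1 then true
    else if variants.contains t1 && variants.contains t2 then true
    else tnmScan t1 t2 rest

def team_names_match (team1 : String) (team2 : String) : Bool :=
  let t1 := PySem.Str.strip (PySem.Str.lower team1)
  let t2 := PySem.Str.strip (PySem.Str.lower team2)
  if t1 == t2 then true
  else tnmScan t1 t2 tnmVariations

-- ===== PORT B =====
-- Source B's module-level flat dict literal _VARIANT_TO_MAIN
def tnmVariantToMain : PySem.Dict String String :=
  PySem.Dict.mk
    [("palmeira", "palmeiras"),
     ("chelsea", "chelsea fc"),
     ("man city", "manchester city"),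
     ("madrid", "real madrid"),
     ("bayern munchen", "bayern münchen"),
     ("bayern", "bayern münchen"),
     ("psg", "paris saint-germain"),
     ("paris sg", "paris saint-germain"),
     ("inter milan", "inter"),
     ("juve", "juventus"),
     ("dortmund", "borussia dortmund"),
     ("benfica", "sl benfica"),
     ("flamengo", "flamengo rj"),
     ("fluminense", "fluminense rj"),
     ("botafogo rj", "botafogo - rj"),
     ("botafogo", "botafogo - rj"),
     ("monterrey", "cf monterrey"),
     ("hilal", "al hilal"),
     ("boca", "boca juniors"),
     ("inter miami", "inter miami cf"),
     ("la fc", "los angeles fc"),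
     ("la galaxy", "los angeles fc"),
     ("river", "river plate"),
     ("rb salzburg", "salzburg"),
     ("red bull salzburg", "salzburg"),
     ("atletico", "atletico madrid"),
     ("atletico de madrid", "atletico madrid")]

-- _VARIANT_TO_MAIN.get(c, c)
def tnmCanon (s : String) : String := tnmVariantToMain.getD s s

def team_names_match_alt (team1 : String) (team2 : String) : Bool :=
  tnmCanon (PySem.Str.strip (PySem.Str.lower team1))
    == tnmCanon (PySem.Str.strip (PySem.Str.lower team2))

-- ===== PRECONDITION & SPEC =====
def Spec_team_names_match (team1 : String) (team2 : String) (out : Bool) : Prop := out = team_names_match_alt team1 team2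
instance (team1 : String) (team2 : String) (out : Bool) : Decidable (Spec_team_names_match team1 team2 out) := by unfold Spec_team_names_match; infer_instance

-- ===== CLAIM (what is proved, stated in full; the proofs are below) =====
def Claim_equal_team_names_match : Prop := ∀ (team1 : String) (team2 : String), Dom_team_names_match team1 team2 → Spec_team_names_match team1 team2 (team_names_match team1 team2)

-- ===== LEMMAS AND PROOFS =====

-- A's group condition, as a predicate on one (main, variants) entry
def tnmCond (t1 t2 : String) (g : String × List String) : Bool :=
  (t1 == g.1 && g.2.contains t2) || (t2 == g.1 && g.2.contains t1)
    || (g.2.contains t1 && g.2.contains t2)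

lemma tnmScan_eq_any (t1 t2 : String) (gs : List (String × List String)) :
    tnmScan t1 t2 gs = gs.any (tnmCond t1 t2) := by
  induction gs with
  | nil => rfl
  | cons g rest ih =>
    obtain ⟨m, vs⟩ := g
    simp only [tnmScan, List.any_cons, tnmCond, ih]
    split_ifs with h1 h2 h3 <;> simp_all

-- the dict's keys are distinct
lemma tnmNodupKeys : tnmVariantToMain.keys.Nodup := by decide

-- the mains of the groups table are distinct
lemma tnmNodupMains : (tnmVariations.map Prod.fst).Nodup := by decide

-- every dict entry (v, m) comes from the group with main m, v among its variants
lemma tnmEntryFromGroup :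
    tnmVariantToMain.items.all
      (fun p => tnmVariations.any (fun g => g.1 == p.2 && g.2.contains p.1)) = true := by decide

-- every variant of every group is a dict entry pointing at its main
lemma tnmGroupToEntry :
    tnmVariations.all
      (fun g => g.2.all (fun v => tnmVariantToMain.items.contains (v, g.1))) = true := by decide

-- no main name is a key of the dict
lemma tnmMainNotKey :
    tnmVariations.all (fun g => !(tnmVariantToMain.contains g.1)) = true := by decide

lemma tnmCanon_of_mem {s m : String} (h : (s, m) ∈ tnmVariantToMain.items) :
    tnmCanon s = m :=
  PySem.Dict.getD_of_mem_items tnmVariantToMain h tnmNodupKeys s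

lemma tnmCanon_of_main {m : String} {vs : List String} (h : (m, vs) ∈ tnmVariations) :
    tnmCanon m = m := by
  have := List.all_eq_true.mp tnmMainNotKey _ h
  exact PySem.Dict.getD_of_not_contains tnmVariantToMain m (by simpa using this)

-- a variant of a group canonicalises to its main
lemma tnmCanon_of_variant {m v : String} {vs : List String}
    (hg : (m, vs) ∈ tnmVariations) (hv : v ∈ vs) : tnmCanon v = m := by
  have h1 := List.all_eq_true.mp tnmGroupToEntry _ hg
  have h2 := List.all_eq_true.mp h1 _ hv
  exact tnmCanon_of_mem (by simpa using h2)

-- distinct firsts determine the second component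
lemma nodup_fst_inj {α β : Type} {l : List (α × β)} (h : (l.map Prod.fst).Nodup)
    {k : α} {a b : β} (ha : (k, a) ∈ l) (hb : (k, b) ∈ l) : a = b := by
  induction l with
  | nil => cases ha
  | cons p rest ih =>
    simp only [List.map_cons, List.nodup_cons, List.mem_map] at h
    rcases List.mem_cons.mp ha with rfl | h1
    · rcases List.mem_cons.mp hb with h2 | h2
      · exact (congrArg Prod.snd h2).symm
      · exact absurd ⟨(k, b), h2, rfl⟩ h.1
    · rcases List.mem_cons.mp hb with rfl | h2
      · exact absurd ⟨(k, a), h1, rfl⟩ h.1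
      · exact ih h.2 h1 h2

-- a key of the dict yields its group
lemma tnmKeyGroup {s m : String} (h : (s, m) ∈ tnmVariantToMain.items) :
    ∃ vs, (m, vs) ∈ tnmVariations ∧ s ∈ vs := by
  have h1 := List.all_eq_true.mp tnmEntryFromGroup _ h
  obtain ⟨g, hg, hc⟩ := List.any_eq_true.mp h1
  obtain ⟨g1, g2⟩ := g
  simp only [Bool.and_eq_true, beq_iff_eq] at hc
  obtain ⟨rfl, hc2⟩ := hc
  exact ⟨g2, hg, by simpa using hc2⟩

-- the heart of the equivalence: for already-normalised names the two matching
-- procedures agree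
lemma tnmCore (s1 s2 : String) :
    (if s1 == s2 then true else tnmScan s1 s2 tnmVariations)
      = (tnmCanon s1 == tnmCanon s2) := by
  by_cases h : s1 = s2
  · simp [h]
  · simp only [beq_eq_false_iff_ne.mpr h]
    rw [tnmScan_eq_any, Bool.eq_iff_iff]
    constructor
    · intro hs
      obtain ⟨g, hg, hc⟩ := List.any_eq_true.mp hs
      obtain ⟨m, vs⟩ := g
      simp only [tnmCond, Bool.or_eq_true, Bool.and_eq_true, beq_iff_eq,
        List.contains_eq_mem, decide_eq_true_eq] at hc
      rcases hc with (⟨h1, h2⟩ | ⟨h1, h2⟩) | ⟨h1, h2⟩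
      · rw [h1, tnmCanon_of_main hg, tnmCanon_of_variant hg h2]; exact beq_self_eq_true m
      · rw [h1, tnmCanon_of_main hg, tnmCanon_of_variant hg h2]; exact beq_self_eq_true m
      · rw [tnmCanon_of_variant hg h1, tnmCanon_of_variant hg h2]; exact beq_self_eq_true m
    · intro hc
      have hc' : tnmCanon s1 = tnmCanon s2 := beq_iff_eq.mp hc
      rcases e1 : tnmVariantToMain.get? s1 with _ | m1 <;>
        rcases e2 : tnmVariantToMain.get? s2 with _ | m2
      · exact absurd (by
          have a1 : tnmCanon s1 = s1 := PySem.Dict.getD_of_get?_eq_none tnmVariantToMain s1 e1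
          have a2 : tnmCanon s2 = s2 := PySem.Dict.getD_of_get?_eq_none tnmVariantToMain s2 e2
          rw [a1, a2] at hc'; exact hc') h
      · -- s1 unknown (so canon s1 = s1), s2 a variant of main m2 = s1
        have a1 : tnmCanon s1 = s1 := PySem.Dict.getD_of_get?_eq_none tnmVariantToMain s1 e1
        have a2 : tnmCanon s2 = m2 := PySem.Dict.getD_of_get?_eq_some tnmVariantToMain s2 e2
        obtain ⟨vs, hg, hv⟩ := tnmKeyGroup (PySem.Dict.mem_items_of_get?_eq_some tnmVariantToMain e2)
        refine List.any_eq_true.mpr ⟨(m2, vs), hg, ?_⟩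
        simp only [tnmCond, Bool.or_eq_true, Bool.and_eq_true, beq_iff_eq,
          List.contains_eq_mem, decide_eq_true_eq]
        exact Or.inl (Or.inl ⟨by rw [← a1, hc', a2], hv⟩)
      · have a1 : tnmCanon s1 = m1 := PySem.Dict.getD_of_get?_eq_some tnmVariantToMain s1 e1
        have a2 : tnmCanon s2 = s2 := PySem.Dict.getD_of_get?_eq_none tnmVariantToMain s2 e2
        obtain ⟨vs, hg, hv⟩ := tnmKeyGroup (PySem.Dict.mem_items_of_get?_eq_some tnmVariantToMain e1)
        refine List.any_eq_true.mpr ⟨(m1, vs), hg, ?_⟩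
        simp only [tnmCond, Bool.or_eq_true, Bool.and_eq_true, beq_iff_eq,
          List.contains_eq_mem, decide_eq_true_eq]
        exact Or.inl (Or.inr ⟨by rw [← a2, ← hc', a1], hv⟩)
      · have a1 : tnmCanon s1 = m1 := PySem.Dict.getD_of_get?_eq_some tnmVariantToMain s1 e1
        have a2 : tnmCanon s2 = m2 := PySem.Dict.getD_of_get?_eq_some tnmVariantToMain s2 e2
        have hm : m1 = m2 := by rw [← a1, ← a2, hc']
        obtain ⟨vs1, hg1, hv1⟩ := tnmKeyGroup (PySem.Dict.mem_items_of_get?_eq_some tnmVariantToMain e1)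
        obtain ⟨vs2, hg2, hv2⟩ := tnmKeyGroup (PySem.Dict.mem_items_of_get?_eq_some tnmVariantToMain e2)
        have hvs : vs1 = vs2 := nodup_fst_inj tnmNodupMains hg1 (hm ▸ hg2)
        refine List.any_eq_true.mpr ⟨(m1, vs1), hg1, ?_⟩
        simp only [tnmCond, Bool.or_eq_true, Bool.and_eq_true, beq_iff_eq,
          List.contains_eq_mem, decide_eq_true_eq]
        exact Or.inr ⟨hv1, hvs ▸ hv2⟩

-- ===== VERDICT (by name: the statement is the Claim_ definition above) =====
theorem team_names_match_spec : Claim_equal_team_names_match := by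
  intro team1 team2 _
  unfold Spec_team_names_match team_names_match team_names_match_alt
  exact tnmCore _ _
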